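-- pv_equiv track=rewrite | github.com/thiagofernandes1987-create/APEX | algorithms/uco-sensor/sensor-api/lang_adapters/javascript.py | _count_duplicates
-- ===== SOURCE A (Python) =====
-- from typing import Optional, Dict, List, Set
--
-- def _count_duplicates(source: str) -> int:
--     lines = [
--         l.strip().lower()
--         for l in source.splitlines()
--         if l.strip() and not l.strip().startswith("//") and len(l.strip()) >= 5
--     ]
--     counts: Dict[str, int] = {}
--     for l in lines:
--         counts[l] = counts.get(l, 0) + 1
--     return sum(1 for c in counts.values() if c >= 2)
-- ===== SOURCE B (Python) =====
-- def _count_duplicates(source: str) -> int: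
--     lines = sorted(
--         l.strip().lower()
--         for l in source.splitlines()
--         if l.strip() and not l.strip().startswith("//") and len(l.strip()) >= 5
--     )
--     dups = 0
--     prev = None
--     run = 0
--     for l in lines:
--         if l == prev:
--             run += 1
--         else:
--             if run >= 2:
--                 dups += 1
--             prev = l
--             run = 1
--     if run >= 2:
--         dups += 1
--     return dups
-- ===== Notes on version B (the rewrite author's own statement) =====
-- stated objective: alternative
-- what changed: B sorts the filtered significant lines and counts duplicated values in one adjacent-run scan over the sorted list (groupby-style run/prev/dups accumulator), instead of A's frequency dictionary followed by a pass over its values.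
import Mathlib
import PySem

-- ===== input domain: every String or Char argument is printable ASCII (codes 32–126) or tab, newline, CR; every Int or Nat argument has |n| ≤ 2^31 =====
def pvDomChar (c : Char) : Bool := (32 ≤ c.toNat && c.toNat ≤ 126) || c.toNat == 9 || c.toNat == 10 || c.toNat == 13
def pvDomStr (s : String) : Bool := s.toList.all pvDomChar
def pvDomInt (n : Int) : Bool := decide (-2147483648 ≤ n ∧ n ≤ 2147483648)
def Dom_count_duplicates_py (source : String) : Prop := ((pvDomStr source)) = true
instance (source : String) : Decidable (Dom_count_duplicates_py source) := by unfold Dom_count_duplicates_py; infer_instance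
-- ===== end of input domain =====

-- B replaces A's frequency dictionary by sort-then-adjacent-run scan; objective: alternative algorithm of similar cost.

-- ===== PORT A =====
-- shared by both ports: the comprehension's filter and the stripped, lowercased significant lines
def pvKeep (l : String) : Bool :=
  let s := PySem.Str.strip l
  !(s == "") && !(PySem.Str.startswith s "//") && decide (5 ≤ PySem.Str.len s)

def pvSig (source : String) : List String :=
  ((PySem.Str.splitlines source).filter pvKeep).map (fun l => PySem.Str.lower (PySem.Str.strip l))

def count_duplicates_py (source : String) : Int :=
  let lines := pvSig source
  let counts : PySem.Dict String Int :=
    lines.foldl (fun d l => d.insert l (d.getD l 0 + 1)) PySem.Dict.empty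
  (counts.values.map (fun c => if 2 ≤ c then (1 : Int) else 0)).sum

-- ===== PORT B =====
-- one step of B's loop over the sorted lines; state = (dups, prev, run)
def pvStep (st : Int × Option String × Int) (l : String) : Int × Option String × Int :=
  if some l == st.2.1 then (st.1, st.2.1, st.2.2 + 1)
  else ((if 2 ≤ st.2.2 then st.1 + 1 else st.1), some l, (1 : Int))

-- B's trailing flush of the last run
def pvFlush (st : Int × Option String × Int) : Int :=
  if 2 ≤ st.2.2 then st.1 + 1 else st.1

def count_duplicates_py_alt (source : String) : Int :=
  let lines := PySem.List.sorted (pvSig source) (fun x => x) false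
  pvFlush (lines.foldl pvStep (0, none, 0))

-- ===== PRECONDITION & SPEC =====
def Spec_count_duplicates_py (source : String) (out : Int) : Prop := out = count_duplicates_py_alt source
instance (source : String) (out : Int) : Decidable (Spec_count_duplicates_py source out) := by unfold Spec_count_duplicates_py; infer_instance

-- ===== CLAIM (what is proved, stated in full; the proofs are below) =====
def Claim_equal_count_duplicates_py : Prop := ∀ (source : String), Dom_count_duplicates_py source → Spec_count_duplicates_py source (count_duplicates_py source)

-- ===== LEMMAS AND PROOFS =====

-- common specification: the number of distinct significant lines occurring at least twice
def dupSpec (u : List String) : Int :=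
  ((u.toFinset.filter (fun k => (2 : Int) ≤ (u.count k : Int))).card : Int)

lemma dupSpec_nil : dupSpec [] = 0 := by simp [dupSpec]

lemma dupSpec_perm {S L : List String} (h : S.Perm L) : dupSpec S = dupSpec L := by
  unfold dupSpec
  have ht : S.toFinset = L.toFinset := by
    ext a
    simp [List.mem_toFinset, h.mem_iff]
  have hf : {k ∈ L.toFinset | (2 : Int) ≤ (S.count k : Int)}
      = {k ∈ L.toFinset | (2 : Int) ≤ (L.count k : Int)} := by
    apply Finset.filter_congr
    intro k _
    rw [h.count_eq]
  rw [ht, hf]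

lemma countP_ofList_eq_card (u : List String) (q : String → Bool) :
    List.countP q (PySem.Set.ofList u) = (u.toFinset.filter (fun a => q a = true)).card := by
  have hn : (PySem.Set.ofList u).Nodup := PySem.Set.nodup_ofList u
  have hf : ((PySem.Set.ofList u).filter q).toFinset = u.toFinset.filter (fun a => q a = true) := by
    rw [List.toFinset_filter]
    congr 1
    ext a
    simp [PySem.Set.mem_ofList]
  calc List.countP q (PySem.Set.ofList u)
      = ((PySem.Set.ofList u).filter q).length := by rw [List.countP_eq_length_filter]
    _ = ((PySem.Set.ofList u).filter q).toFinset.card :=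
        (List.toFinset_card_of_nodup (hn.filter q)).symm
    _ = _ := by rw [hf]

lemma A_eq (source : String) : count_duplicates_py source = dupSpec (pvSig source) := by
  show (List.map (fun c => if 2 ≤ c then (1 : Int) else 0)
      (List.foldl (fun (d : PySem.Dict String Int) l => d.insert l (d.getD l 0 + 1))
        PySem.Dict.empty (pvSig source)).values).sum = dupSpec (pvSig source)
  rw [PySem.Dict.foldl_insert_getD_add_one_eq_counter]
  simp only [PySem.Dict.values, PySem.Dict.items_counter, List.map_map, Function.comp_def]
  have h := PySem.List.sum_map_ite_one_zero
      (fun k => decide ((2 : Int) ≤ ((pvSig source).count k : Int))) (PySem.Set.ofList (pvSig source))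
  simp only [decide_eq_true_eq] at h
  rw [h, countP_ofList_eq_card]
  unfold dupSpec
  simp only [decide_eq_true_eq]

lemma dupSpec_cons (y : String) (ys : List String) :
    dupSpec (y :: ys)
      = (if (2 : Int) ≤ 1 + (ys.count y : Int) then 1 else 0)
        + dupSpec (ys.filter (fun z => !(z == y))) := by
  unfold dupSpec
  have hins : insert y ys.toFinset = insert y (ys.toFinset.erase y) := by
    ext a
    simp only [Finset.mem_insert, Finset.mem_erase]
    constructor
    · rintro (rfl | h)
      · exact Or.inl rfl
      · by_cases hay : a = y
        · exact Or.inl hay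
        · exact Or.inr ⟨hay, h⟩
    · rintro (rfl | ⟨_, h⟩)
      · exact Or.inl rfl
      · exact Or.inr h
  have hset : (ys.filter (fun z => !(z == y))).toFinset = ys.toFinset.erase y := by
    rw [List.toFinset_filter]
    ext a
    simp [Finset.mem_erase, and_comm]
  have hcongr : (ys.toFinset.erase y).filter (fun k => (2 : Int) ≤ ((y :: ys).count k : Int))
      = (ys.toFinset.erase y).filter
          (fun k => (2 : Int) ≤ ((ys.filter (fun z => !(z == y))).count k : Int)) := by
    apply Finset.filter_congr
    intro k hk
    have hky : k ≠ y := (Finset.mem_erase.mp hk).1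
    have h1 : (y :: ys).count k = ys.count k := by
      have hyk : ¬ y = k := fun h => hky h.symm
      simp [hyk]
    have h2 : (ys.filter (fun z => !(z == y))).count k = ys.count k := by
      apply List.count_filter
      have hbk : (k == y) = false := beq_eq_false_iff_ne.mpr hky
      rw [hbk]
      rfl
    rw [h1, h2]
  have hy_not : y ∉ (ys.toFinset.erase y).filter (fun k => (2 : Int) ≤ ((y :: ys).count k : Int)) := by
    intro hmem
    exact (Finset.mem_erase.mp (Finset.mem_filter.mp hmem).1).1 rfl
  rw [List.toFinset_cons, hins, Finset.filter_insert]
  by_cases hp : (2 : Int) ≤ ((y :: ys).count y : Int)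
  · rw [if_pos hp, Finset.card_insert_of_notMem hy_not, hcongr]
    have hcy : ((y :: ys).count y : Int) = 1 + (ys.count y : Int) := by
      rw [List.count_cons_self]
      push_cast
      ring
    rw [if_pos (by rw [← hcy]; exact hp)]
    rw [hset]
    push_cast
    ring
  · rw [if_neg hp, hcongr]
    have hcy : ((y :: ys).count y : Int) = 1 + (ys.count y : Int) := by
      rw [List.count_cons_self]
      push_cast
      ring
    rw [if_neg (by rw [← hcy]; exact hp)]
    rw [hset]
    ring

lemma run_go (t : List String) : ∀ (cur : String) (dups run : Int),
    t.Pairwise (· ≤ ·) → (∀ z ∈ t, cur ≤ z) →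
    pvFlush (t.foldl pvStep (dups, some cur, run)) =
      dups + (if (2 : Int) ≤ run + (t.count cur : Int) then 1 else 0)
        + dupSpec (t.filter (fun z => !(z == cur))) := by
  induction t with
  | nil =>
    intro cur dups run _ _
    simp only [List.foldl_nil, List.count_nil, List.filter_nil, dupSpec_nil, pvFlush]
    split_ifs <;> omega
  | cons y ys ih =>
    intro cur dups run hp hc
    rcases List.pairwise_cons.mp hp with ⟨hy, hp'⟩
    by_cases hyc : y = cur
    · subst hyc
      have hstep : pvStep (dups, some y, run) y = (dups, some y, run + 1) := by
        simp [pvStep]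
      rw [List.foldl_cons, hstep, ih y dups (run + 1) hp' hy]
      have hfilt : (y :: ys).filter (fun z => !(z == y)) = ys.filter (fun z => !(z == y)) := by
        simp
      rw [hfilt, List.count_cons_self]
      have harith : run + 1 + (ys.count y : Int) = run + ((ys.count y + 1 : Nat) : Int) := by
        push_cast; ring
      rw [harith]
    · have hcley : cur ≤ y := hc y (List.mem_cons_self)
      have hlt : cur < y := lt_of_le_of_ne hcley (fun h => hyc h.symm)
      have hnotmem : cur ∉ y :: ys := by
        intro hmem
        rcases List.mem_cons.mp hmem with h | h
        · exact absurd h.symm hyc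
        · exact absurd (lt_of_lt_of_le hlt (hy cur h)) (lt_irrefl cur)
      have hcount : (y :: ys).count cur = 0 := List.count_eq_zero.mpr hnotmem
      have hfilt : (y :: ys).filter (fun z => !(z == cur)) = y :: ys := by
        apply List.filter_eq_self.mpr
        intro a ha
        have hca : cur < a := by
          rcases List.mem_cons.mp ha with h | h
          · exact h ▸ hlt
          · exact lt_of_lt_of_le hlt (hy a h)
        simp
        exact (ne_of_gt hca)
      have hstep : pvStep (dups, some cur, run) y
          = ((if 2 ≤ run then dups + 1 else dups), some y, 1) := by
        simp [pvStep, hyc]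
      rw [List.foldl_cons, hstep, ih y _ 1 hp' hy, hfilt, dupSpec_cons, hcount]
      push_cast
      split_ifs <;> omega

lemma run_top (t : List String) (hp : t.Pairwise (· ≤ ·)) :
    pvFlush (t.foldl pvStep (0, none, 0)) = dupSpec t := by
  cases t with
  | nil => simp [pvFlush, dupSpec]
  | cons y ys =>
    rcases List.pairwise_cons.mp hp with ⟨hy, hp'⟩
    have hstep : pvStep (0, none, 0) y = (0, some y, 1) := by
      simp [pvStep]
    rw [List.foldl_cons, hstep, run_go ys y 0 1 hp' hy, dupSpec_cons]
    ring

lemma B_eq (source : String) : count_duplicates_py_alt source = dupSpec (pvSig source) := by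
  unfold count_duplicates_py_alt
  have hpair : (PySem.List.sorted (pvSig source) (fun x => x) false).Pairwise (· ≤ ·) := by
    simpa using PySem.List.sorted_pairwise (pvSig source) (fun x => x)
  rw [run_top _ hpair]
  exact dupSpec_perm (PySem.List.sorted_perm (pvSig source) (fun x => x) false)

-- ===== VERDICT (by name: the statement is the Claim_ definition above) =====
theorem count_duplicates_py_spec : Claim_equal_count_duplicates_py := by
  intro source _
  show count_duplicates_py source = count_duplicates_py_alt source
  rw [A_eq, B_eq]
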